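-- pv_equiv track=rewrite | github.com/stuart-presnell/Advent2023 | Puzzle18/Puzzle_18.py | corners_and_verts
-- ===== SOURCE A (Python) =====
-- dir_lookup = {
--   'U':(-1,0),
--   'D':( 1,0),
--   'L':(0,-1),
--   'R':(0, 1)
-- }
--
-- def corners_and_verts(ip):
--   '''Given a list of instructions `ip` of the form `[dir, n, _]`,
--   return a list of points visited when we jump along those instructions, starting at `(0,0)`;
--   annotate each corner with its shape, 'L', 'J', 'F', or '7'.
--   Also return a list of the vertical runs.'''
--   verts = []
--   visited = []
--   pt = (0,0)
--   m = len(ip)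
--   for i in range(len(ip)):
--     [dir, n, _, shape] = ip[i]
--     step = dir_lookup[dir]
--     next_pt = (pt[0] + n*step[0], pt[1] + n*step[1])
--     corner_type = ip[(i+1)%m][3]
--     visited.append((next_pt[0], next_pt[1], corner_type))
--     if (dir == 'U') | (dir == 'D'):
--       verts.append([pt, next_pt])
--     pt = next_pt
--   if visited[-1] == visited[0]:
--     visited.pop()
--   visited.sort()
--   verts.sort()
--   return (visited, verts)
-- ===== SOURCE B (Python) =====
-- dir_lookup = {
--   'U':(-1,0),
--   'D':( 1,0),
--   'L':(0,-1),
--   'R':(0, 1)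
-- }
--
-- def corners_and_verts(ip):
--   # Build the full point table first (prefix sums of displacements), then reshape with zips.
--   steps = [(n * dir_lookup[d][0], n * dir_lookup[d][1]) for d, n, _, _ in ip]
--   pts = [(0, 0)]
--   for s in steps:
--     pts.append((pts[-1][0] + s[0], pts[-1][1] + s[1]))
--   shapes = [e[3] for e in ip]
--   next_shapes = shapes[1:] + shapes[:1]
--   visited = [(p[0], p[1], s) for p, s in zip(pts[1:], next_shapes)]
--   verts = [[pr[0], pr[1]] for pr, e in zip(zip(pts, pts[1:]), ip) if e[0] in ('U', 'D')]
--   if visited[-1] == visited[0]: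
--     visited = visited[:-1]
--   return (sorted(visited), sorted(verts))
-- ===== Notes on version B (the rewrite author's own statement) =====
-- stated objective: alternative
-- what changed: Instead of one index loop threading a current point and appending to both outputs with an (i+1)%m lookup, B first builds the whole vertex table as a prefix scan of the displacement list and then derives visited (zip of shifted points with rotated shapes) and verts (filtered zip of consecutive point pairs) in separate passes.
import Mathlib
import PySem

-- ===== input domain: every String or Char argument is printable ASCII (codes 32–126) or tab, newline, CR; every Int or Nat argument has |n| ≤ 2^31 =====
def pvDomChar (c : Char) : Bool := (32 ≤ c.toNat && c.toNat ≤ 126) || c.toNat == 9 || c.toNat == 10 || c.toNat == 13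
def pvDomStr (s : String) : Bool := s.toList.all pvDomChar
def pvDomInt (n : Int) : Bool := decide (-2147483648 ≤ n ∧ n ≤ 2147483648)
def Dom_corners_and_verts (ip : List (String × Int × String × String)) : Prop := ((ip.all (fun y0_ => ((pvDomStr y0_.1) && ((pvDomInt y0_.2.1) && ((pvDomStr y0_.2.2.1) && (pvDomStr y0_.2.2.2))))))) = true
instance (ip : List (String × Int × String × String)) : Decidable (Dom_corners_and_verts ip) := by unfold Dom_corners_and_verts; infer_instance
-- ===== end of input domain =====

-- B builds the whole point table as a prefix scan of the displacements and then derives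
-- visited/verts by zips over that table, instead of A's single index loop with (i+1)%m lookups.

-- shared helpers: the module constant dir_lookup, and Python's lexicographic sort orders
def dlk : PySem.Dict String (Int × Int) :=
  ((((PySem.Dict.empty.insert "U" (-1, 0)).insert "D" (1, 0)).insert "L" (0, -1)).insert "R" (0, 1))

-- Python '<' on (int, int, str) triples: lexicographic
def ltV (a b : Int × Int × String) : Bool :=
  decide (a.1 < b.1 ∨ (a.1 = b.1 ∧ (a.2.1 < b.2.1 ∨ (a.2.1 = b.2.1 ∧ a.2.2 < b.2.2))))

-- Python '<' on (int, int) pairs: lexicographic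
def ltPt (a b : Int × Int) : Bool := decide (a.1 < b.1 ∨ (a.1 = b.1 ∧ a.2 < b.2))

-- Python '<' on lists of such pairs: elementwise, ties broken by length
def ltVert : List (Int × Int) → List (Int × Int) → Bool
  | [], [] => false
  | [], _ :: _ => true
  | _ :: _, [] => false
  | a :: as, b :: bs => if ltPt a b then true else if a == b then ltVert as bs else false

-- list.sort() = stable sort by the strict lexicographic order (PySem's insertion sort)
def sortV (xs : List (Int × Int × String)) : List (Int × Int × String) :=
  xs.foldl (fun acc x => PySem.List.insertBy ltV x acc) []
def sortW (xs : List (List (Int × Int))) : List (List (Int × Int)) :=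
  xs.foldl (fun acc x => PySem.List.insertBy ltVert x acc) []

def pvDflt4 : String × Int × String × String := ("", 0, "", "")

-- ===== PORT A =====
-- one iteration of A's 'for i in range(len(ip))' loop; state = (verts, visited, pt)
def aStep (ip : List (String × Int × String × String)) (m : Int)
    (st : List (List (Int × Int)) × List (Int × Int × String) × (Int × Int)) (i : Int) :
    List (List (Int × Int)) × List (Int × Int × String) × (Int × Int) :=
  let e := PySem.List.pyGetD ip i pvDflt4
  let step := PySem.Dict.getD dlk e.1 (0, 0)
  let next_pt : Int × Int := (st.2.2.1 + e.2.1 * step.1, st.2.2.2 + e.2.1 * step.2)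
  let corner_type := (PySem.List.pyGetD ip (PySem.Int.mod (i + 1) m) pvDflt4).2.2.2
  ((if e.1 == "U" || e.1 == "D" then st.1 ++ [[st.2.2, next_pt]] else st.1),
   st.2.1 ++ [(next_pt.1, next_pt.2, corner_type)],
   next_pt)

def corners_and_verts (ip : List (String × Int × String × String)) :
    (List (Int × Int × String)) × (List (List (Int × Int))) :=
  let m : Int := PySem.List.len ip
  let st := (PySem.List.pyRange 0 m 1).foldl (aStep ip m) ([], [], ((0 : Int), (0 : Int)))
  let verts := st.1
  let visited := st.2.1
  let visited :=
    if PySem.List.pyGetD visited (-1) (0, 0, "") == PySem.List.pyGetD visited 0 (0, 0, "") then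
      visited.dropLast
    else visited
  (sortV visited, sortW verts)

-- ===== PORT B =====
def corners_and_verts_alt (ip : List (String × Int × String × String)) :
    (List (Int × Int × String)) × (List (List (Int × Int))) :=
  let steps := ip.map (fun e =>
    (e.2.1 * (PySem.Dict.getD dlk e.1 (0, 0)).1, e.2.1 * (PySem.Dict.getD dlk e.1 (0, 0)).2))
  let pts := steps.foldl
    (fun acc s => acc ++ [((PySem.List.pyGetD acc (-1) (0, 0)).1 + s.1,
                           (PySem.List.pyGetD acc (-1) (0, 0)).2 + s.2)])
    [((0 : Int), (0 : Int))]
  let shapes := ip.map (fun e => e.2.2.2)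
  let next_shapes := PySem.List.slice shapes (some 1) none ++ PySem.List.slice shapes none (some 1)
  let visited := ((PySem.List.slice pts (some 1) none).zip next_shapes).map
    (fun p => (p.1.1, p.1.2, p.2))
  let verts := (((pts.zip (PySem.List.slice pts (some 1) none)).zip ip).filter
      (fun z => z.2.1 == "U" || z.2.1 == "D")).map (fun z => [z.1.1, z.1.2])
  let visited :=
    if PySem.List.pyGetD visited (-1) (0, 0, "") == PySem.List.pyGetD visited 0 (0, 0, "") then
      PySem.List.slice visited none (some (-1))
    else visited
  (sortV visited, sortW verts)

-- ===== PRECONDITION & SPEC =====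
-- Pre_ excludes exactly the inputs where Python A raises: empty ip (IndexError on visited[-1])
-- and any direction outside {'U','D','L','R'} (KeyError in dir_lookup).
def Pre_corners_and_verts (ip : List (String × Int × String × String)) : Prop :=
  ip ≠ [] ∧ ∀ e ∈ ip, e.1 = "U" ∨ e.1 = "D" ∨ e.1 = "L" ∨ e.1 = "R"
instance (ip : List (String × Int × String × String)) : Decidable (Pre_corners_and_verts ip) := by
  unfold Pre_corners_and_verts; infer_instance

def pvWitness_corners_and_verts : List (String × Int × String × String) :=
  [("R", 2, "#", "F"), ("D", 1, "#", "7"), ("L", 2, "#", "J"), ("U", 1, "#", "L")]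

def Spec_corners_and_verts (ip : List (String × Int × String × String)) (out : (List (Int × Int × String)) × (List (List (Int × Int)))) : Prop := out = corners_and_verts_alt ip
instance (ip : List (String × Int × String × String)) (out : (List (Int × Int × String)) × (List (List (Int × Int)))) : Decidable (Spec_corners_and_verts ip out) := by unfold Spec_corners_and_verts; infer_instance

-- ===== CLAIM (what is proved, stated in full; the proofs are below) =====
def Claim_equal_corners_and_verts : Prop := ∀ (ip : List (String × Int × String × String)), Dom_corners_and_verts ip → Pre_corners_and_verts ip → Spec_corners_and_verts ip (corners_and_verts ip)


-- ===== LEMMAS AND PROOFS =====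

-- proof-side description of B's point table: a prefix scan of the displacement list
def scanPts (p : Int × Int) : List (Int × Int) → List (Int × Int)
  | [] => []
  | s :: rest => (p.1 + s.1, p.2 + s.2) :: scanPts (p.1 + s.1, p.2 + s.2) rest

def stepsOf (ip : List (String × Int × String × String)) : List (Int × Int) :=
  ip.map (fun e =>
    (e.2.1 * (PySem.Dict.getD dlk e.1 (0, 0)).1, e.2.1 * (PySem.Dict.getD dlk e.1 (0, 0)).2))

def ptsOf (ip : List (String × Int × String × String)) : List (Int × Int) :=
  ((0 : Int), (0 : Int)) :: scanPts ((0 : Int), (0 : Int)) (stepsOf ip)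

def nextShapesOf (ip : List (String × Int × String × String)) : List String :=
  (ip.map (fun e => e.2.2.2)).drop 1 ++ (ip.map (fun e => e.2.2.2)).take 1

def Mof (ip : List (String × Int × String × String)) : List ((Int × Int) × String) :=
  ((ptsOf ip).drop 1).zip (nextShapesOf ip)

def Lof (ip : List (String × Int × String × String)) :
    List (((Int × Int) × (Int × Int)) × (String × Int × String × String)) :=
  ((ptsOf ip).zip ((ptsOf ip).drop 1)).zip ip

theorem scanPts_length (steps : List (Int × Int)) :
    ∀ p, (scanPts p steps).length = steps.length := by
  induction steps with
  | nil => intro p; rfl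
  | cons s rest ih => intro p; simp [scanPts, ih]

theorem scanPts_getD_succ (steps : List (Int × Int)) :
    ∀ (p : Int × Int) (k : Nat), k < steps.length →
      (p :: scanPts p steps).getD (k + 1) (0, 0) =
        (((p :: scanPts p steps).getD k (0, 0)).1 + (steps.getD k (0, 0)).1,
         ((p :: scanPts p steps).getD k (0, 0)).2 + (steps.getD k (0, 0)).2) := by
  induction steps with
  | nil => intro p k hk; simp at hk
  | cons s rest ih =>
    intro p k hk
    cases k with
    | zero => simp [scanPts]
    | succ k =>
      have hk' : k < rest.length := by simpa using hk
      have := ih (p.1 + s.1, p.2 + s.2) k hk'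
      simpa [scanPts] using this

-- B's append-to-pts loop is exactly the prefix scan
theorem foldl_pts (steps : List (Int × Int)) :
    ∀ (acc : List (Int × Int)) (x : Int × Int),
      steps.foldl
        (fun acc s => acc ++ [((PySem.List.pyGetD acc (-1) (0, 0)).1 + s.1,
                               (PySem.List.pyGetD acc (-1) (0, 0)).2 + s.2)])
        (acc ++ [x]) = acc ++ x :: scanPts x steps := by
  induction steps with
  | nil => intro acc x; simp [scanPts]
  | cons s rest ih =>
    intro acc x
    simp only [List.foldl_cons, PySem.List.pyGetD_neg_one_append_singleton, scanPts]
    have := ih (acc ++ [x]) (x.1 + s.1, x.2 + s.2)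
    simpa using this

theorem length_ptsOf (ip : List (String × Int × String × String)) :
    (ptsOf ip).length = ip.length + 1 := by
  simp [ptsOf, scanPts_length, stepsOf]

theorem length_Mof (ip : List (String × Int × String × String)) :
    (Mof ip).length = ip.length := by
  simp [Mof, length_ptsOf, nextShapesOf]
  omega

theorem length_Lof (ip : List (String × Int × String × String)) :
    (Lof ip).length = ip.length := by
  simp [Lof, length_ptsOf]

-- the successor relation on ptsOf, via the displacement at index k
theorem ptsOf_getD_succ (ip : List (String × Int × String × String)) (k : Nat)
    (hk : k < ip.length) :
    (ptsOf ip).getD (k + 1) (0, 0) =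
      (((ptsOf ip).getD k (0, 0)).1 + ((stepsOf ip).getD k (0, 0)).1,
       ((ptsOf ip).getD k (0, 0)).2 + ((stepsOf ip).getD k (0, 0)).2) := by
  have : k < (stepsOf ip).length := by simpa [stepsOf] using hk
  simpa [ptsOf] using scanPts_getD_succ (stepsOf ip) (0, 0) k this

-- the (i+1) % m shape rotation equals indexing the rotated shape list
theorem corner_eq (ip : List (String × Int × String × String)) (k : Nat)
    (hk : k < ip.length) :
    (PySem.List.pyGetD ip (PySem.Int.mod ((k : Int) + 1) (PySem.List.len ip)) pvDflt4).2.2.2 =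
      (nextShapesOf ip).getD k "" := by
  have hm : (0 : Int) < PySem.List.len ip := by
    simp [PySem.List.len_eq]; omega
  rw [PySem.Int.mod_eq_emod_of_pos hm]
  rcases Nat.lt_or_ge (k + 1) ip.length with h | h
  · have : ((k : Int) + 1) % (PySem.List.len ip) = ((k + 1 : Nat) : Int) := by
      rw [PySem.List.len_eq]
      rw [Int.emod_eq_of_lt (by omega) (by exact_mod_cast h)]
      push_cast; ring
    rw [this, PySem.List.pyGetD_natCast]
    rw [List.getD_eq_getElem?_getD, List.getD_eq_getElem?_getD]
    rw [show (nextShapesOf ip) = (ip.map (fun e => e.2.2.2)).drop 1 ++ (ip.map (fun e => e.2.2.2)).take 1 from rfl]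
    rw [List.getElem?_append_left (by simp; omega)]
    simp only [List.getElem?_drop, List.getElem?_map]
    rw [List.getElem?_eq_getElem h, Nat.add_comm 1 k, List.getElem?_eq_getElem h]
    simp
  · have hk1 : k + 1 = ip.length := by omega
    have : ((k : Int) + 1) % (PySem.List.len ip) = 0 := by
      rw [PySem.List.len_eq]
      have : ((k : Int) + 1) = (ip.length : Int) := by exact_mod_cast hk1
      rw [this, Int.emod_self]
    rw [this]
    have h0 : 0 < ip.length := by omega
    rw [show ((0:Int)) = ((0:Nat):Int) from rfl, PySem.List.pyGetD_natCast]
    rw [List.getD_eq_getElem?_getD, List.getD_eq_getElem?_getD]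
    rw [show (nextShapesOf ip) = (ip.map (fun e => e.2.2.2)).drop 1 ++ (ip.map (fun e => e.2.2.2)).take 1 from rfl]
    rw [List.getElem?_append_right (by simp; omega)]
    simp only [List.length_drop, List.length_map]
    have : k - (ip.length - 1) = 0 := by omega
    rw [this]
    rw [List.getElem?_take_of_lt (by omega)]
    rw [List.getElem?_eq_getElem h0, List.getElem?_eq_getElem (by simpa using h0)]
    simp

theorem Lof_getElem (ip : List (String × Int × String × String)) (k : Nat)
    (h : k < ip.length) (h' : k < (Lof ip).length) :
    (Lof ip)[k] = (((ptsOf ip).getD k (0, 0), (ptsOf ip).getD (k + 1) (0, 0)), ip[k]) := by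
  have h1 : k < (ptsOf ip).length := by rw [length_ptsOf]; omega
  have h2 : 1 + k < (ptsOf ip).length := by rw [length_ptsOf]; omega
  simp [Lof, List.getElem_zip, List.getD_eq_getElem?_getD, h1]
  rw [List.getElem?_eq_getElem (by omega)]; simp

theorem Mof_getElem (ip : List (String × Int × String × String)) (k : Nat)
    (h : k < ip.length) (h' : k < (Mof ip).length) :
    (Mof ip)[k] = ((ptsOf ip).getD (k + 1) (0, 0), (nextShapesOf ip).getD k "") := by
  have h2 : 1 + k < (ptsOf ip).length := by rw [length_ptsOf]; omega
  have h3 : k < (nextShapesOf ip).length := by simp [nextShapesOf]; omega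
  simp [Mof, List.getElem_zip, List.getD_eq_getElem?_getD, h3]
  rw [List.getElem?_eq_getElem (by omega)]; simp

-- the main loop invariant: from index k with the k-th point, A's loop appends exactly
-- B's suffixes of the two zipped tables
theorem loop_eq (ip : List (String × Int × String × String)) :
    ∀ (d k : Nat), k + d = ip.length → ∀ (verts : List (List (Int × Int)))
      (visited : List (Int × Int × String)),
      (PySem.List.pyRange (k : Int) (PySem.List.len ip) 1).foldl (aStep ip (PySem.List.len ip))
        (verts, visited, (ptsOf ip).getD k (0, 0)) =
      (verts ++ (((Lof ip).drop k).filter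
          (fun z => z.2.1 == "U" || z.2.1 == "D")).map (fun z => [z.1.1, z.1.2]),
       visited ++ ((Mof ip).drop k).map (fun p => (p.1.1, p.1.2, p.2)),
       (ptsOf ip).getD ip.length (0, 0)) := by
  intro d
  induction d with
  | zero =>
    intro k hk verts visited
    have hk' : k = ip.length := by omega
    subst hk'
    rw [PySem.List.pyRange_one_eq_nil (by simp [PySem.List.len_eq])]
    simp [List.drop_of_length_le, length_Lof, length_Mof]
  | succ d ih =>
    intro k hk verts visited
    have hklt : k < ip.length := by omega
    have hL : k < (Lof ip).length := by rw [length_Lof]; omega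
    have hM : k < (Mof ip).length := by rw [length_Mof]; omega
    have hs : (stepsOf ip).getD k (0, 0)
        = (ip[k].2.1 * (PySem.Dict.getD dlk ip[k].1 (0, 0)).1,
           ip[k].2.1 * (PySem.Dict.getD dlk ip[k].1 (0, 0)).2) := by
      simp [stepsOf, List.getD_eq_getElem?_getD, List.getElem?_map, List.getElem?_eq_getElem hklt]
    have hstep : aStep ip (PySem.List.len ip)
        (verts, visited, (ptsOf ip).getD k (0, 0)) (k : Int)
        = ((if ip[k].1 == "U" || ip[k].1 == "D" then
              verts ++ [[(ptsOf ip).getD k (0, 0), (ptsOf ip).getD (k + 1) (0, 0)]]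
            else verts),
           visited ++ [(((ptsOf ip).getD (k + 1) (0, 0)).1,
                        ((ptsOf ip).getD (k + 1) (0, 0)).2, (nextShapesOf ip).getD k "")],
           (ptsOf ip).getD (k + 1) (0, 0)) := by
      simp only [aStep]
      rw [corner_eq ip k hklt, ptsOf_getD_succ ip k hklt, hs]
      simp [List.getD_eq_getElem?_getD, List.getElem?_eq_getElem hklt]
    rw [PySem.List.pyRange_one_cons (by simp [PySem.List.len_eq]; omega), List.foldl_cons, hstep,
        show ((k : Int) + 1) = (((k + 1 : Nat)) : Int) by push_cast; ring,
        ih (k + 1) (by omega) _ _]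
    rw [List.drop_eq_getElem_cons hL, List.drop_eq_getElem_cons hM,
        Lof_getElem ip k hklt hL, Mof_getElem ip k hklt hM]
    by_cases hc : (ip[k].1 == "U" || ip[k].1 == "D") = true
    · simp [hc, List.append_assoc]
    · simp [hc, List.append_assoc]

-- ===== VERDICT (by name: the statement is the Claim_ definition above) =====
theorem corners_and_verts_spec : Claim_equal_corners_and_verts := by
  intro ip _ _
  unfold Spec_corners_and_verts
  have hpts : (ip.map (fun e =>
        (e.2.1 * (PySem.Dict.getD dlk e.1 (0, 0)).1,
         e.2.1 * (PySem.Dict.getD dlk e.1 (0, 0)).2))).foldl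
      (fun acc s => acc ++ [((PySem.List.pyGetD acc (-1) (0, 0)).1 + s.1,
                             (PySem.List.pyGetD acc (-1) (0, 0)).2 + s.2)])
      [((0 : Int), (0 : Int))] = ptsOf ip := by
    simpa [ptsOf, stepsOf] using foldl_pts (stepsOf ip) [] ((0 : Int), (0 : Int))
  have hloop := loop_eq ip ip.length 0 (by omega) [] []
  simp only [Nat.cast_zero, List.drop_zero, List.nil_append] at hloop
  have h00 : (ptsOf ip).getD 0 (0, 0) = ((0 : Int), (0 : Int)) := rfl
  rw [h00] at hloop
  simp only [corners_and_verts, corners_and_verts_alt]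
  rw [hpts, hloop]
  simp only [Mof, Lof, nextShapesOf, PySem.List.slice_from_one, ← List.drop_one,
    PySem.List.slice_to_neg_one,
    PySem.List.slice_to _ (by norm_num : (0 : Int) ≤ 1), Int.toNat_one]
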